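-- pv_equiv track=rewrite | github.com/bluebluecard/thesis | enumerate_min_cost.py | reform_cost
-- ===== SOURCE A (Python) =====
-- edge_cost = {1:[(1,4),(2,6),(3,9)],2:[(1,5),(2,4),(3,7)],3:[(1,6),(2,3),(3,4)],4:[(1,8),(2,5),(3,3)],5:[(1,10),(2,8),(3,4)]}
--
-- def reform_cost(p_com):
--     new_cost = []
--     for m in range(1,6):
--         temp = []
--         for i in range(len(p_com)):
--             if p_com[i] == '1':
--                 temp.append(edge_cost[m][i][1])
--         new_cost.append(temp)
--     return new_cost
-- ===== SOURCE B (Python) =====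
-- edge_cost = {1:[(1,4),(2,6),(3,9)],2:[(1,5),(2,4),(3,7)],3:[(1,6),(2,3),(3,4)],4:[(1,8),(2,5),(3,3)],5:[(1,10),(2,8),(3,4)]}
--
-- def reform_cost(p_com):
--     # gather one 5-entry cost COLUMN per active mask position, then transpose
--     cols = [[edge_cost[m][i][1] for m in range(1, 6)]
--             for i, c in enumerate(p_com) if c == '1']
--     if not cols:
--         return [[] for _ in range(5)]
--     return [list(row) for row in zip(*cols)]
-- ===== Notes on version B (the rewrite author's own statement) =====
-- stated objective: faster
-- what changed: A builds the result row by row with five independent conditional scans of the mask; B builds the transposed matrix first (one 5-entry cost column per active mask position, from a single filtered pass) and then transposes it with zip(*cols), so the mask is scanned once instead of five times.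
import Mathlib
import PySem

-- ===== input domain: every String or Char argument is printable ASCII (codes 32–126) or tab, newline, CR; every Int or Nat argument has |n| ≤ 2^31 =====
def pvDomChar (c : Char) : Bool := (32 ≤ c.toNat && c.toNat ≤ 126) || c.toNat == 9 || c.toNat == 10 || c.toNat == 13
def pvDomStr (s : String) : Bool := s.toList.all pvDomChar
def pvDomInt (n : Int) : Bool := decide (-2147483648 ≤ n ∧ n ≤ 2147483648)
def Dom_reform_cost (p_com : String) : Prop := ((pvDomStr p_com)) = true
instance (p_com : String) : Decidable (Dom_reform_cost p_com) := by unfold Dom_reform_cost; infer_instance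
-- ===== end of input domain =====

-- B replaces A's row-by-row construction (five independent conditional scans of the mask)
-- by building the TRANSPOSED matrix first — one cost column per active position, from a
-- single filtered pass — and transposing it with zip(*cols): one mask scan instead of five (objective: faster, measured).

-- module constant edge_cost (shared context of both programs)
def edgeCost : PySem.Dict Int (List (Int × Int)) :=
  PySem.Dict.ofList [(1, [(1,4),(2,6),(3,9)]), (2, [(1,5),(2,4),(3,7)]),
                     (3, [(1,6),(2,3),(3,4)]), (4, [(1,8),(2,5),(3,3)]),
                     (5, [(1,10),(2,8),(3,4)])]

-- ===== PORT A =====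
-- edge_cost[m][i] is out of range exactly where Python raises IndexError; those
-- inputs are excluded by Pre_, so the total pyGetD's default is never reached there.
def reform_cost (p_com : String) : List (List Int) :=
  (PySem.List.pyRange 1 6 1).foldl (fun new_cost m =>
    let temp := (PySem.List.pyRange 0 (PySem.Str.len p_com) 1).foldl
      (fun temp i =>
        if PySem.List.pyGetD p_com.toList i ' ' = '1' then
          temp ++ [(PySem.List.pyGetD (edgeCost.getD m []) i (0, 0)).2]
        else temp) ([] : List Int)
    new_cost ++ [temp]) []

-- ===== PORT B =====
-- zip(*cols): Python's zip truncates at the shortest argument; exact port of that rule.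
def pyZipStar (ls : List (List Int)) : List (List Int) :=
  if h : ls = [] ∨ ls.any (·.isEmpty) then []
  else (ls.map (fun l => l.headD 0)) :: pyZipStar (ls.map List.tail)
termination_by (ls.headD []).length
decreasing_by
  obtain ⟨h1, h2⟩ := not_or.mp h
  cases ls with
  | nil => exact absurd rfl h1
  | cons x rest =>
    cases x with
    | nil => exact absurd (by simp) h2
    | cons a t => simp

def reform_cost_alt (p_com : String) : List (List Int) :=
  let cols := ((PySem.List.enumerate p_com.toList 0).filter (fun p => p.2 == '1')).map
    (fun p => (PySem.List.pyRange 1 6 1).map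
      (fun m => (PySem.List.pyGetD (edgeCost.getD m []) p.1 (0, 0)).2))
  if cols = [] then (PySem.List.pyRange 0 5 1).map (fun _ => ([] : List Int))
  else pyZipStar cols

-- ===== PRECONDITION & SPEC =====
-- Pre_ excludes exactly the masks with an active bit at position ≥ 3, on which Python's
-- edge_cost[m][i] raises IndexError (in A and in B alike).
def Pre_reform_cost (p_com : String) : Prop := '1' ∉ p_com.toList.drop 3
instance (p_com : String) : Decidable (Pre_reform_cost p_com) := by unfold Pre_reform_cost; infer_instance
def pvWitness_reform_cost : String := "101"
def Spec_reform_cost (p_com : String) (out : List (List Int)) : Prop := out = reform_cost_alt p_com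
instance (p_com : String) (out : List (List Int)) : Decidable (Spec_reform_cost p_com out) := by unfold Spec_reform_cost; infer_instance

-- ===== CLAIM (what is proved, stated in full; the proofs are below) =====
def Claim_equal_reform_cost : Prop := ∀ (p_com : String), Dom_reform_cost p_com → Pre_reform_cost p_com → Spec_reform_cost p_com (reform_cost p_com)

-- ===== LEMMAS AND PROOFS =====
def pvVal (m i : Int) : Int := (PySem.List.pyGetD (edgeCost.getD m []) i (0, 0)).2

-- one unfolding step of pyZipStar on equal-shape nonempty columns
theorem pvZip_step {α : Type} (q : α) (l : List α) (a : α → Int) (r : α → List Int) :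
    pyZipStar ((q :: l).map (fun i => a i :: r i)) =
      ((q :: l).map a) :: pyZipStar ((q :: l).map r) := by
  rw [pyZipStar, dif_neg (by simp)]
  have ht : List.map (List.tail ∘ fun i => a i :: r i) l = List.map r l := by
    simp only [Function.comp_def, List.tail_cons]
  simp [List.map_map, ht]

theorem pvZip_empty {α : Type} (q : α) (l : List α) :
    pyZipStar ((q :: l).map (fun _ => ([] : List Int))) = [] := by
  rw [pyZipStar]
  rw [dif_pos (Or.inr (by simp))]

theorem pvZip5 {α : Type} (q : α) (l : List α) (a b c d e : α → Int) :
    pyZipStar ((q :: l).map (fun i => [a i, b i, c i, d i, e i])) =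
      [(q :: l).map a, (q :: l).map b, (q :: l).map c, (q :: l).map d, (q :: l).map e] := by
  rw [pvZip_step q l a (fun i => [b i, c i, d i, e i])]
  rw [pvZip_step q l b (fun i => [c i, d i, e i])]
  rw [pvZip_step q l c (fun i => [d i, e i])]
  rw [pvZip_step q l d (fun i => [e i])]
  rw [pvZip_step q l e (fun _ => ([] : List Int))]
  rw [pvZip_empty]

-- A's inner loop over the mask builds exactly the m-th row: edge values at active positions
theorem pv_a_row (cs : List Char) (m : Int) :
    (PySem.List.pyRange 0 (cs.length : Int) 1).foldl
      (fun temp i =>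
        if PySem.List.pyGetD cs i ' ' = '1' then
          temp ++ [(PySem.List.pyGetD (edgeCost.getD m []) i (0, 0)).2]
        else temp) ([] : List Int)
    = ((PySem.List.enumerate cs 0).filter (fun p => p.2 == '1')).map (fun p => pvVal m p.1) := by
  have h1 : (PySem.List.pyRange 0 (cs.length : Int) 1).foldl
      (fun temp i =>
        if PySem.List.pyGetD cs i ' ' = '1' then
          temp ++ [(PySem.List.pyGetD (edgeCost.getD m []) i (0, 0)).2]
        else temp) ([] : List Int)
    = ((PySem.List.pyRange 0 (cs.length : Int) 1).map (fun j => (j, PySem.List.pyGetD cs j ' '))).foldl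
      (fun temp (p : Int × Char) =>
        if p.2 = '1' then temp ++ [pvVal m p.1]
        else temp) ([] : List Int) := by
    rw [List.foldl_map]
    rfl
  rw [h1]
  have h2 : (PySem.List.pyRange 0 ((cs.length : Int)) 1).map (fun j => (j, PySem.List.pyGetD cs j ' '))
      = PySem.List.enumerate cs 0 := by
    rw [PySem.List.enumerate_eq_map_pyRange cs ' ']
    simp
  rw [h2, PySem.List.foldl_append_ite (fun p : Int × Char => p.2 = '1') (fun p => pvVal m p.1)]
  simp only [List.nil_append]
  rfl

-- ===== VERDICT (by name: the statement is the Claim_ definition above) =====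
theorem reform_cost_spec : Claim_equal_reform_cost := by
  intro p_com _ _
  unfold Spec_reform_cost reform_cost reform_cost_alt
  rw [show PySem.List.pyRange 1 6 1 = [1,2,3,4,5] by decide]
  simp only [List.foldl_cons, List.foldl_nil, PySem.Str.len_eq, List.nil_append]
  rw [pv_a_row, pv_a_row, pv_a_row, pv_a_row, pv_a_row]
  cases h : (PySem.List.enumerate p_com.toList 0).filter (fun p => p.2 == '1') with
  | nil => decide
  | cons q l =>
      rw [if_neg (by simp)]
      rw [show (fun (p : Int × Char) => List.map
            (fun m => (PySem.List.pyGetD (edgeCost.getD m []) p.1 (0, 0)).2) [1,2,3,4,5])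
          = (fun (p : Int × Char) => [pvVal 1 p.1, pvVal 2 p.1, pvVal 3 p.1, pvVal 4 p.1, pvVal 5 p.1])
        from rfl]
      rw [pvZip5 q l (fun p => pvVal 1 p.1) (fun p => pvVal 2 p.1) (fun p => pvVal 3 p.1)
            (fun p => pvVal 4 p.1) (fun p => pvVal 5 p.1)]
      simp
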